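-- pv_equiv track=rewrite | github.com/ReinvanRossum/Greed | greed.py | find_more_of_a_kind
-- ===== SOURCE A (Python) =====
-- def find_more_of_a_kind(dice_list, score):
--     for counted_die in range(3, 7):
--         if dice_list.count(1) == counted_die:
--             score += 1000 * 2**(counted_die - 3)
--     for die in range(2, 7):
--         for counted_die in range(3, 7):
--             if dice_list.count(die) == counted_die:
--                 score += die * 100 * 2**(counted_die - 3)
--     return score
-- ===== SOURCE B (Python) =====
-- from collections import Counter
--
-- def find_more_of_a_kind(dice_list, score):
--     counts = Counter(dice_list)
--     for die in range(1, 7):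
--         cnt = counts.get(die, 0)
--         if 3 <= cnt <= 6:
--             score += (1000 if die == 1 else die * 100) * 2 ** (cnt - 3)
--     return score
-- ===== Notes on version B (the rewrite author's own statement) =====
-- stated objective: simpler
-- what changed: One Counter tally plus a closed-form score per face (2**(cnt-3) when 3<=cnt<=6) replaces the nested loops doing 24 repeated list.count scans.
import Mathlib
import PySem

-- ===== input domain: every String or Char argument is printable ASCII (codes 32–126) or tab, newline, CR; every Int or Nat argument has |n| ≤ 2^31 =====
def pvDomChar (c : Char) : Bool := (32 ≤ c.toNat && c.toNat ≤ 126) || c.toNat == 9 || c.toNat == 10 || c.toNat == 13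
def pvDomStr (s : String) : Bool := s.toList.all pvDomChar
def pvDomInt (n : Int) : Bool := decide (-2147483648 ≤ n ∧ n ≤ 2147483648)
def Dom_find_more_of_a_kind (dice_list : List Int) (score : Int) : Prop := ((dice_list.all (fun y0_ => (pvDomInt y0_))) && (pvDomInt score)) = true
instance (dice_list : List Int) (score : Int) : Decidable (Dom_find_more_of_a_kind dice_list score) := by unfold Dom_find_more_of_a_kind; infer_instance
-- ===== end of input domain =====

-- B replaces A's nested loops (24 repeated list.count scans) by one Counter tally and a
-- closed-form score per face value; objective: simpler.


-- ===== PORT A =====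
-- 2**(counted_die - 3): counted_die ∈ range(3,7), so the exponent is nonnegative and
-- (cd - 3).toNat is exact.
def find_more_of_a_kind (dice_list : List Int) (score : Int) : Int :=
  let s1 := (PySem.List.pyRange 3 7 1).foldl
    (fun s cd => if (PySem.List.count dice_list 1 : Int) = cd then s + 1000 * 2 ^ (cd - 3).toNat else s) score
  (PySem.List.pyRange 2 7 1).foldl
    (fun s die => (PySem.List.pyRange 3 7 1).foldl
      (fun s cd => if (PySem.List.count dice_list die : Int) = cd then s + die * 100 * 2 ^ (cd - 3).toNat else s) s) s1

-- ===== PORT B =====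
-- 2**(cnt - 3): guarded by 3 <= cnt, so (cnt - 3).toNat is exact.
def find_more_of_a_kind_alt (dice_list : List Int) (score : Int) : Int :=
  let counts := PySem.Dict.counter dice_list
  (PySem.List.pyRange 1 7 1).foldl
    (fun s die =>
      let cnt := counts.getD die 0
      if 3 ≤ cnt ∧ cnt ≤ 6 then s + (if die = 1 then 1000 else die * 100) * 2 ^ (cnt - 3).toNat else s)
    score

-- ===== PRECONDITION & SPEC =====
def Spec_find_more_of_a_kind (dice_list : List Int) (score : Int) (out : Int) : Prop := out = find_more_of_a_kind_alt dice_list score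
instance (dice_list : List Int) (score : Int) (out : Int) : Decidable (Spec_find_more_of_a_kind dice_list score out) := by unfold Spec_find_more_of_a_kind; infer_instance

-- ===== CLAIM (what is proved, stated in full; the proofs are below) =====
def Claim_equal_find_more_of_a_kind : Prop := ∀ (dice_list : List Int) (score : Int), Dom_find_more_of_a_kind dice_list score → Spec_find_more_of_a_kind dice_list score (find_more_of_a_kind dice_list score)

-- ===== LEMMAS AND PROOFS =====

-- A's inner scan over counted_die ∈ [3,6] equals the closed-form score for a face with count c.
theorem stepA (c v s : Int) :
    ([(3:Int),4,5,6].foldl (fun s cd => if c = cd then s + v * 2 ^ (cd - 3).toNat else s) s)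
      = if 3 ≤ c ∧ c ≤ 6 then s + v * 2 ^ (c - 3).toNat else s := by
  simp only [List.foldl]
  by_cases h3 : c = 3 <;> by_cases h4 : c = 4 <;> by_cases h5 : c = 5 <;> by_cases h6 : c = 6 <;>
    subst_vars <;> simp_all <;> norm_num <;> omega

-- ===== VERDICT (by name: the statement is the Claim_ definition above) =====
theorem find_more_of_a_kind_spec : Claim_equal_find_more_of_a_kind := by
  intro dice_list score _
  unfold Spec_find_more_of_a_kind find_more_of_a_kind find_more_of_a_kind_alt
  have hr37 : PySem.List.pyRange 3 7 1 = [3, 4, 5, 6] := by decide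
  have hr27 : PySem.List.pyRange 2 7 1 = [2, 3, 4, 5, 6] := by decide
  have hr17 : PySem.List.pyRange 1 7 1 = [1, 2, 3, 4, 5, 6] := by decide
  simp only [hr37, hr27, hr17, PySem.Dict.getD_counter, List.foldl, stepA]
  norm_num
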